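-- pv_equiv track=rewrite | github.com/ccubc/coding_test_prep | leetcode_algorithm/leetcode_medium_528.py | find_idx_min_greater_than
-- ===== SOURCE A (Python) =====
-- def find_idx_min_greater_than(num_list, tgt):
--     # brute_force
--     # if method == 'bf':
--     #     for i, n in enumerate(num_list):
--     #         if n >= tgt:
--     #             return i
--
--     # binary search
--     l, r = 0, len(num_list) - 1
--     while l < r - 1:
--         mid = l + (r - l + 1) // 2
--         if num_list[mid] == tgt:
--             return mid
--         elif num_list[mid] < tgt:
--             l = mid
--         else:
--             r = mid
--     if num_list[l] < tgt:
--         return r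
--     else:
--         return l
-- ===== SOURCE B (Python) =====
-- def find_idx_min_greater_than(num_list, tgt):
--     # Divide-and-conquer on list slices: the window is carried as an actual
--     # sublist plus its base offset, instead of two index bounds.
--     def go(base, seg):
--         if len(seg) <= 2:
--             return base + len(seg) - 1 if seg[0] < tgt else base
--         k = len(seg) // 2
--         v = seg[k]
--         if v == tgt:
--             return base + k
--         if v < tgt:
--             return go(base + k, seg[k:])
--         return go(base, seg[:k + 1])
--     return go(0, num_list)
-- ===== Notes on version B (the rewrite author's own statement) =====
-- stated objective: alternative
-- what changed: Replaces the iterative two-index (l, r) while-loop with a divide-and-conquer recursion that carries the current window as an actual list slice plus a base offset, recursing on seg[k:] or seg[:k+1].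
import Mathlib
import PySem

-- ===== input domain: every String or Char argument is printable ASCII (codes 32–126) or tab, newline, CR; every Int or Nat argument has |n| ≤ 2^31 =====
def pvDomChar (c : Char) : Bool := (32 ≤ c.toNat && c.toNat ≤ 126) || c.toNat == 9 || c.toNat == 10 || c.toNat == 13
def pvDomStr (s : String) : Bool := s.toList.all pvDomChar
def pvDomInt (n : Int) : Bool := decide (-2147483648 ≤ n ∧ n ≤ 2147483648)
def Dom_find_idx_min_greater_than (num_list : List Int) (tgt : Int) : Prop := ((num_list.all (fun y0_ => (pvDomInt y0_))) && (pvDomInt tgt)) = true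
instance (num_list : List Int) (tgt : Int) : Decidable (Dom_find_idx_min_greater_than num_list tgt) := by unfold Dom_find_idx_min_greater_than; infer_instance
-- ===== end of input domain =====

-- B re-expresses A's two-index binary-search loop as a divide-and-conquer
-- recursion over actual list slices (window = base offset + sublist); same
-- return value on every nonempty list (both raise IndexError on []).

-- ===== PORT A =====
-- the while-loop of A, state (l, r); indexing via pyGetD (always in range on Pre_)
def pvLoopA (nl : List Int) (tgt l r : Int) : Int :=
  if l < r - 1 then
    if PySem.List.pyGetD nl (l + PySem.Int.floordiv (r - l + 1) 2) 0 = tgt then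
      l + PySem.Int.floordiv (r - l + 1) 2
    else if PySem.List.pyGetD nl (l + PySem.Int.floordiv (r - l + 1) 2) 0 < tgt then
      pvLoopA nl tgt (l + PySem.Int.floordiv (r - l + 1) 2) r
    else
      pvLoopA nl tgt l (l + PySem.Int.floordiv (r - l + 1) 2)
  else
    if PySem.List.pyGetD nl l 0 < tgt then r else l
termination_by (r - l).toNat
decreasing_by
  all_goals
    have hf : PySem.Int.floordiv (r - l + 1) 2 = (r - l + 1) / 2 :=
      PySem.Int.floordiv_eq_ediv_of_pos (by omega)
    omega

def find_idx_min_greater_than (num_list : List Int) (tgt : Int) : Int :=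
  pvLoopA num_list tgt 0 (num_list.length - 1)

-- ===== PORT B =====
-- Source B's go(base, seg); seg[k:] = drop k, seg[:k+1] = take (k+1) (k in range)
def pvGoB (tgt base : Int) (seg : List Int) : Int :=
  if seg.length ≤ 2 then
    if PySem.List.pyGetD seg 0 0 < tgt then base + (seg.length : Int) - 1 else base
  else
    if PySem.List.pyGetD seg ((seg.length / 2 : Nat) : Int) 0 = tgt then
      base + ((seg.length / 2 : Nat) : Int)
    else if PySem.List.pyGetD seg ((seg.length / 2 : Nat) : Int) 0 < tgt then
      pvGoB tgt (base + ((seg.length / 2 : Nat) : Int)) (seg.drop (seg.length / 2))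
    else
      pvGoB tgt base (seg.take (seg.length / 2 + 1))
termination_by seg.length
decreasing_by all_goals simp [List.length_take, List.length_drop]; omega

def find_idx_min_greater_than_alt (num_list : List Int) (tgt : Int) : Int :=
  pvGoB tgt 0 num_list

-- ===== PRECONDITION & SPEC =====
-- Pre_ excludes only the empty list, on which A (and B) raise IndexError.
def Pre_find_idx_min_greater_than (num_list : List Int) (tgt : Int) : Prop := num_list ≠ []
instance (num_list : List Int) (tgt : Int) : Decidable (Pre_find_idx_min_greater_than num_list tgt) := by unfold Pre_find_idx_min_greater_than; infer_instance
def pvWitness_find_idx_min_greater_than : List Int × Int := ([1, 2, 3], 2)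
def Spec_find_idx_min_greater_than (num_list : List Int) (tgt : Int) (out : Int) : Prop := out = find_idx_min_greater_than_alt num_list tgt
instance (num_list : List Int) (tgt : Int) (out : Int) : Decidable (Spec_find_idx_min_greater_than num_list tgt out) := by unfold Spec_find_idx_min_greater_than; infer_instance

-- ===== CLAIM (what is proved, stated in full; the proofs are below) =====
def Claim_equal_find_idx_min_greater_than : Prop := ∀ (num_list : List Int) (tgt : Int), Dom_find_idx_min_greater_than num_list tgt → Pre_find_idx_min_greater_than num_list tgt → Spec_find_idx_min_greater_than num_list tgt (find_idx_min_greater_than num_list tgt)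

-- ===== LEMMAS AND PROOFS =====
theorem pvSeg_getD (nl : List Int) (a j m : Nat) (hj : j < m) (hjm : a + m ≤ nl.length) :
    ((nl.drop a).take m).getD j 0 = PySem.List.pyGetD nl ((a : Int) + (j : Int)) 0 := by
  rw [PySem.List.pyGetD_eq_getElem nl 0 (by omega) (by push_cast; omega)]
  rw [List.getD_eq_getElem _ _ (by simp [List.length_take, List.length_drop]; omega)]
  have ht : ((a : Int) + (j : Int)).toNat = a + j := by omega
  simp [List.getElem_take, List.getElem_drop, ht]

theorem pvLoop_eq_go (nl : List Int) (tgt l r : Int)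
    (h0 : 0 ≤ l) (hlr : l ≤ r) (hr : r < (nl.length : Int)) :
    pvLoopA nl tgt l r = pvGoB tgt l ((nl.drop l.toNat).take (r - l + 1).toNat) := by
  have hseglen : ((nl.drop l.toNat).take (r - l + 1).toNat).length = (r - l + 1).toNat := by
    simp [List.length_take, List.length_drop]; omega
  by_cases hc : l < r - 1
  · set m : Nat := (r - l + 1).toNat with hm
    set k : Nat := m / 2 with hk
    have hkb : 1 ≤ k ∧ k + 2 ≤ m := by omega
    have hfd : PySem.Int.floordiv (r - l + 1) 2 = (k : Int) := by
      rw [PySem.Int.floordiv_eq_ediv_of_pos (by omega : (0:Int) < 2)]; omega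
    have hv : ((nl.drop l.toNat).take m).getD k 0 = PySem.List.pyGetD nl (l + (k : Int)) 0 := by
      have h := pvSeg_getD nl l.toNat k m (by omega) (by omega)
      rw [h]; congr 1; omega
    rw [pvLoopA, pvGoB]
    rw [if_pos hc, if_neg (by omega : ¬ ((nl.drop l.toNat).take m).length ≤ 2)]
    simp only [hseglen, ← hk, hfd, PySem.List.pyGetD_natCast, hv]
    split_ifs with h1 h2
    · rfl
    · have hrec := pvLoop_eq_go nl tgt (l + (k : Int)) r (by omega) (by omega) hr
      rw [hrec]; congr 1
      rw [List.drop_take, List.drop_drop]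
      congr 1
      · omega
      · congr 1; omega
    · have hrec := pvLoop_eq_go nl tgt l (l + (k : Int)) (by omega) (by omega) (by omega)
      rw [hrec]; congr 1
      rw [List.take_take]
      congr 1; omega
  · rw [pvLoopA, pvGoB]
    rw [if_neg hc, if_pos (by omega : ((nl.drop l.toNat).take (r - l + 1).toNat).length ≤ 2)]
    have hv : ((nl.drop l.toNat).take (r - l + 1).toNat).getD 0 0 = PySem.List.pyGetD nl l 0 := by
      have h := pvSeg_getD nl l.toNat 0 (r - l + 1).toNat (by omega) (by omega)
      rw [h]; congr 1; omega
    simp only [hseglen, PySem.List.pyGetD_zero, hv]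
    split_ifs with h1
    · omega
    · rfl
termination_by (r - l).toNat
decreasing_by all_goals omega

-- ===== VERDICT (by name: the statement is the Claim_ definition above) =====
theorem find_idx_min_greater_than_spec : Claim_equal_find_idx_min_greater_than := by
  intro nl tgt _ hpre
  unfold Spec_find_idx_min_greater_than find_idx_min_greater_than find_idx_min_greater_than_alt
  have hlen : 1 ≤ nl.length := List.length_pos_iff.mpr hpre
  have h := pvLoop_eq_go nl tgt 0 ((nl.length : Int) - 1) (by omega) (by omega) (by omega)
  simpa [show (((nl.length : Int) - 1 - 0 + 1).toNat) = nl.length by omega] using h
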